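-- pv_equiv track=rewrite | github.com/KarolinaPSouza/dataset-pesquisa | 1619-Restaurant_Customers/5800581.py | solve
-- ===== SOURCE A (Python) =====
-- def solve(A,B):
--     N = dict()
--     for a in A:
--         N[a] = N.get(a,0) + 1
--     for b in B:
--         N[b] = N.get(b,0) - 1
--     tot, maxi = 0, 0
--     for t in sorted(N.keys()):
--         tot += N[t]
--         maxi = max(maxi, tot)
--     return maxi
-- ===== SOURCE B (Python) =====
-- def solve(A, B):
--     # Sort once, then for each arrival time t the occupancy is
--     # (#A <= t) - (#B <= t), each found by binary search; answer floored at 0.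
--     SA = sorted(A)
--     SB = sorted(B)
--     def count_le(t, S):
--         # S ascending: number of elements <= t
--         lo, hi = 0, len(S)
--         while lo < hi:
--             mid = (lo + hi) // 2
--             if S[mid] <= t:
--                 lo = mid + 1
--             else:
--                 hi = mid
--         return lo
--     return max([0] + [count_le(t, SA) - count_le(t, SB) for t in A])
-- ===== Notes on version B (the rewrite author's own statement) =====
-- stated objective: alternative
-- what changed: Replaces the dict-of-net-deltas plus sorted-keys prefix-sum sweep by sorting A and B once and, for each arrival time t, computing the occupancy (#A<=t)-(#B<=t) directly with two binary searches, taking the max with 0.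
import Mathlib
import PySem

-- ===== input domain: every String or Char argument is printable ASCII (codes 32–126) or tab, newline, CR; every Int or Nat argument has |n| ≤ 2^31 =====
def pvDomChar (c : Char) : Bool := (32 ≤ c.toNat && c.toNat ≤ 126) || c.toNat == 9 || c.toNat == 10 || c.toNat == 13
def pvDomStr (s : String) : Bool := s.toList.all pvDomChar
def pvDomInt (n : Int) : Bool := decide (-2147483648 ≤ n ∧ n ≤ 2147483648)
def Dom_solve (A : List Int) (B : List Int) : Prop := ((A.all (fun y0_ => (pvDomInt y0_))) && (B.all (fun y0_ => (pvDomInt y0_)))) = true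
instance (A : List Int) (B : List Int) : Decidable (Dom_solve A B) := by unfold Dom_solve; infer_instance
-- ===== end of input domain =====

-- B replaces A's dict-of-net-deltas + sort + prefix-sum sweep by a direct per-arrival-time
-- overlap count (max over t in A of #A<=t - #B<=t, floored at 0); objective: simpler.


-- ===== PORT A =====
def solve (A : List Int) (B : List Int) : Int :=
  -- N = dict(); for a in A: N[a] = N.get(a,0) + 1; for b in B: N[b] = N.get(b,0) - 1
  let n1 := A.foldl (fun d a => d.insert a (d.getD a 0 + 1)) (PySem.Dict.empty : PySem.Dict Int Int)
  let n2 := B.foldl (fun d b => d.insert b (d.getD b 0 - 1)) n1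
  -- tot, maxi = 0, 0; for t in sorted(N.keys()): tot += N[t]; maxi = max(maxi, tot)
  let p := (PySem.List.sorted n2.keys (fun x => x) false).foldl
    (fun (p : Int × Int) t =>
      let tot := p.1 + n2.getD t 0
      (tot, max p.2 tot)) (0, 0)
  p.2

-- ===== PORT B =====
-- count_le(t, S): the hand-written binary-search while loop (lo, hi), S ascending
def bs (S : List Int) (t : Int) (lo hi : Nat) : Nat :=
  if _h : lo < hi then
    let mid := (lo + hi) / 2
    if S.getD mid 0 ≤ t then bs S t (mid + 1) hi else bs S t lo mid
  else lo
termination_by hi - lo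
decreasing_by all_goals omega

-- max([0] + ys) over Int values = left fold of max starting at 0 (exact for ints)
def solve_alt (A : List Int) (B : List Int) : Int :=
  let sa := PySem.List.sorted A (fun x => x) false
  let sb := PySem.List.sorted B (fun x => x) false
  (A.map (fun t => ((bs sa t 0 sa.length : Int) - (bs sb t 0 sb.length : Int)))).foldl max 0

-- ===== PRECONDITION & SPEC =====
def Spec_solve (A : List Int) (B : List Int) (out : Int) : Prop := out = solve_alt A B
instance (A : List Int) (B : List Int) (out : Int) : Decidable (Spec_solve A B out) := by unfold Spec_solve; infer_instance

-- ===== CLAIM (what is proved, stated in full; the proofs are below) =====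
def Claim_equal_solve : Prop := ∀ (A : List Int) (B : List Int), Dom_solve A B → Spec_solve A B (solve A B)

-- ===== LEMMAS AND PROOFS =====

-- number of elements of L that are ≤ t, as an Int
def cnt (L : List Int) (t : Int) : Int := ((L.filter (fun x => decide (x ≤ t))).length : Int)

-- number of customers present at time t
def g (A B : List Int) (t : Int) : Int := cnt A t - cnt B t

-- net delta (arrivals minus departures) at time t
def dlt (A B : List Int) (t : Int) : Int := (A.count t : Int) - (B.count t : Int)

lemma filter_len_eq (S : List Int) (t : Int) (lo : Nat) (hlo : lo ≤ S.length)
    (hlow : ∀ i, i < lo → ∀ h : i < S.length, S[i] ≤ t)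
    (hhigh : ∀ i, lo ≤ i → ∀ h : i < S.length, ¬ S[i] ≤ t) :
    (S.filter (fun x => decide (x ≤ t))).length = lo := by
  have hfe : S.filter (fun x => decide (x ≤ t)) = S.take lo := by
    conv_lhs => rw [← List.take_append_drop lo S]
    rw [List.filter_append]
    have h1 : (S.take lo).filter (fun x => decide (x ≤ t)) = S.take lo := by
      rw [List.filter_eq_self]
      intro a ha
      obtain ⟨i, hilen, hival⟩ := List.mem_iff_getElem.mp ha
      have hlenle : (S.take lo).length ≤ lo := by simp
      have hitake : i < lo := by omega
      have hia : a = S[i]'(by simp at hilen; omega) := by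
        rw [← hival, List.getElem_take]
      rw [hia]
      simp [hlow i hitake]
    have h2 : (S.drop lo).filter (fun x => decide (x ≤ t)) = [] := by
      rw [List.filter_eq_nil_iff]
      intro a ha
      obtain ⟨i, hilen, hival⟩ := List.mem_iff_getElem.mp ha
      have hilen' : lo + i < S.length := by simp at hilen; omega
      have hia : a = S[lo + i]'hilen' := by
        rw [← hival, List.getElem_drop]
      rw [hia]
      simp [hhigh (lo + i) (by omega) hilen']
    rw [h1, h2, List.append_nil]
  rw [hfe, List.length_take]
  omega

lemma bs_aux (S : List Int) (t : Int) (hs : S.Pairwise (· ≤ ·)) :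
    ∀ n lo hi, hi - lo ≤ n → lo ≤ hi → hi ≤ S.length →
    (∀ i, i < lo → ∀ h : i < S.length, S[i] ≤ t) →
    (∀ i, hi ≤ i → ∀ h : i < S.length, ¬ S[i] ≤ t) →
    bs S t lo hi = (S.filter (fun x => decide (x ≤ t))).length := by
  have hmono : ∀ i j (hij : i ≤ j) (hj : j < S.length), S[i]'(by omega) ≤ S[j] := by
    intro i j hij hj
    rcases Nat.eq_or_lt_of_le hij with rfl | hlt
    · exact le_refl _
    · exact List.pairwise_iff_getElem.mp hs i j (by omega) hj hlt
  intro n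
  induction n with
  | zero =>
    intro lo hi hn hlohi hhi hlow hhigh
    have heq : lo = hi := by omega
    subst heq
    rw [bs]
    simp only [lt_irrefl, dif_neg, not_false_iff]
    exact (filter_len_eq S t lo hhi hlow hhigh).symm
  | succ n ih =>
    intro lo hi hn hlohi hhi hlow hhigh
    rw [bs]
    by_cases h : lo < hi
    · simp only [h, dif_pos]
      have hmidlt : (lo + hi) / 2 < hi := by omega
      have hmidge : lo ≤ (lo + hi) / 2 := by omega
      have hmlen : (lo + hi) / 2 < S.length := by omega
      rw [List.getD_eq_getElem S 0 hmlen]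
      by_cases hc : S[(lo + hi) / 2] ≤ t
      · simp only [hc, if_pos]
        exact ih ((lo+hi)/2+1) hi (by omega) (by omega) hhi
          (fun i hilt hlen => le_trans (hmono i ((lo+hi)/2) (by omega) hmlen) hc)
          hhigh
      · simp only [hc, if_neg, not_false_iff]
        exact ih lo ((lo+hi)/2) (by omega) (by omega) (by omega)
          hlow
          (fun i hige hlen hle => hc (le_trans (hmono ((lo+hi)/2) i hige hlen) hle))
    · simp only [h, dif_neg, not_false_iff]
      have heq : lo = hi := by omega
      subst heq
      exact (filter_len_eq S t lo hhi hlow hhigh).symm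

lemma bs_correct (S : List Int) (t : Int) (hs : S.Pairwise (· ≤ ·)) :
    bs S t 0 S.length = (S.filter (fun x => decide (x ≤ t))).length :=
  bs_aux S t hs S.length 0 S.length (by omega) (by omega) (le_refl _)
    (by omega) (fun i hi h => by omega)

-- binary search over sorted L counts the elements ≤ t
lemma bs_sorted_eq_cnt (L : List Int) (t : Int) :
    ((bs (PySem.List.sorted L (fun x => x) false) t 0 (PySem.List.sorted L (fun x => x) false).length : Nat) : Int) = cnt L t := by
  rw [bs_correct _ t (PySem.List.sorted_pairwise _ _)]
  unfold cnt
  congr 1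
  exact ((PySem.List.sorted_perm L (fun x => x) false).filter _).length_eq

lemma getD_foldl_insert_sub_one (l : List Int) (d : PySem.Dict Int Int) (v : Int) :
    (l.foldl (fun d x => d.insert x (d.getD x 0 - 1)) d).getD v 0 = d.getD v 0 - (l.count v : Int) := by
  induction l generalizing d with
  | nil => simp
  | cons x l ih =>
    simp only [List.foldl_cons, ih, PySem.Dict.getD_insert, List.count_cons]
    by_cases h : v = x
    · simp [h]; ring
    · simp [h, Ne.symm h]

-- the list of running sums produced by A's sweep loop
def rs (f : Int → Int) : Int → List Int → List Int
  | _, [] => []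
  | tot, t :: l => (tot + f t) :: rs f (tot + f t) l

lemma foldl_pair_eq_rs (f : Int → Int) (l : List Int) (tot maxi : Int) :
    (l.foldl (fun (p : Int × Int) t => (p.1 + f t, max p.2 (p.1 + f t))) (tot, maxi)).2
      = (rs f tot l).foldl max maxi := by
  induction l generalizing tot maxi with
  | nil => simp [rs]
  | cons t l ih => simp [rs, ih]

lemma sum_indicator (S : List Int) (c : Int) :
    (S.map (fun k => if k = c then (1 : Int) else 0)).sum = (S.count c : Int) := by
  induction S with
  | nil => simp
  | cons s S ih =>
    simp only [List.map_cons, List.sum_cons, ih, List.count_cons]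
    by_cases h : s = c
    · simp [h]; ring
    · simp [h]

lemma sum_count_eq (S : List Int) (C : List Int) (hnd : S.Nodup) (hsub : ∀ a ∈ C, a ∈ S) :
    (S.map (fun k => (C.count k : Int))).sum = (C.length : Int) := by
  induction C with
  | nil => simp
  | cons c C ih =>
    have hc : S.count c = 1 := List.count_eq_one_of_mem hnd (hsub c (by simp))
    have : (S.map (fun k => ((c :: C).count k : Int))).sum
        = (S.map (fun k => (C.count k : Int))).sum + (S.map (fun k => if k = c then (1:Int) else 0)).sum := by
      rw [← List.sum_map_add]
      congr 1
      apply List.map_congr_left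
      intro k _
      by_cases h : k = c
      · simp [h]
      · simp [h, Ne.symm h]
    rw [this, ih (fun a ha => hsub a (by simp [ha])), sum_indicator, hc]
    simp

lemma sum_map_sub (S : List Int) (f h : Int → Int) :
    (S.map (fun k => f k - h k)).sum = (S.map f).sum - (S.map h).sum := by
  induction S with
  | nil => simp
  | cons s S ih => simp [ih]; ring

lemma sum_count_filter (S C : List Int) (t : Int)
    (hnd : S.Nodup) (hle : ∀ x ∈ S, x ≤ t)
    (hcomp : ∀ a, a ∈ C → a ≤ t → a ∈ S) :
    (S.map (fun k => (C.count k : Int))).sum = cnt C t := by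
  have h1 : ∀ k ∈ S, (C.count k : Int) = ((C.filter (fun x => decide (x ≤ t))).count k : Int) := by
    intro k hk
    congr 1
    rw [List.count_filter]
    simp [hle k hk]
  rw [List.map_congr_left h1]
  rw [sum_count_eq S _ hnd]
  · rfl
  · intro a ha
    rw [List.mem_filter] at ha
    exact hcomp a ha.1 (by simpa using ha.2)

-- sum of deltas over a nodup set of times ≤ t that contains every relevant time ≤ t = occupancy at t
lemma sum_dlt_eq_g (A B : List Int) (S : List Int) (t : Int)
    (hnd : S.Nodup) (hle : ∀ x ∈ S, x ≤ t)
    (hcomp : ∀ a, (a ∈ A ∨ a ∈ B) → a ≤ t → a ∈ S) :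
    (S.map (dlt A B)).sum = g A B t := by
  unfold dlt g
  rw [sum_map_sub]
  rw [sum_count_filter S A t hnd hle (fun a ha h => hcomp a (Or.inl ha) h)]
  rw [sum_count_filter S B t hnd hle (fun a ha h => hcomp a (Or.inr ha) h)]

-- on a strictly sorted complete list of times, the running sums are exactly the occupancies
lemma rs_eq_map_g (A B : List Int) :
    ∀ (l₂ l₁ : List Int), (l₁ ++ l₂).Pairwise (· < ·) →
    (∀ a, (a ∈ A ∨ a ∈ B) → a ∈ l₁ ++ l₂) →
    rs (dlt A B) ((l₁.map (dlt A B)).sum) l₂ = l₂.map (g A B) := by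
  intro l₂
  induction l₂ with
  | nil => intro l₁ _ _; simp [rs]
  | cons t l₂ ih =>
    intro l₁ hp hcomp
    have hp1 : (l₁ ++ [t]).Pairwise (· < ·) := by
      have : (l₁ ++ [t]).Sublist (l₁ ++ t :: l₂) :=
        ((List.nil_sublist l₂).cons_cons t).append_left l₁
      exact hp.sublist this
    have hcross : ∀ x ∈ l₁, ∀ y ∈ t :: l₂, x < y := (List.pairwise_append.mp hp).2.2
    have htl : ∀ y ∈ l₂, t < y := fun y hy =>
      List.rel_of_pairwise_cons ((List.pairwise_append.mp hp).2.1) hy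
    have hkey : ((l₁ ++ [t]).map (dlt A B)).sum = g A B t := by
      apply sum_dlt_eq_g
      · exact hp1.nodup
      · intro x hx
        rcases List.mem_append.mp hx with hx | hx
        · exact le_of_lt (hcross x hx t (by simp))
        · simp at hx; omega
      · intro a ha hat
        have := hcomp a ha
        rcases List.mem_append.mp this with h | h
        · exact List.mem_append.mpr (Or.inl h)
        · rcases List.mem_cons.mp h with rfl | h
          · simp
          · exact absurd (htl a h) (by omega)
    have hsum : (l₁.map (dlt A B)).sum + dlt A B t = ((l₁ ++ [t]).map (dlt A B)).sum := by
      simp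
    show ((l₁.map (dlt A B)).sum + dlt A B t) :: rs (dlt A B) ((l₁.map (dlt A B)).sum + dlt A B t) l₂
        = g A B t :: l₂.map (g A B)
    rw [hsum, hkey]
    congr 1
    rw [← hkey]
    exact ih (l₁ ++ [t]) (by simpa using hp) (by simpa using hcomp)

lemma le_foldl_max (l : List Int) (a : Int) : a ≤ l.foldl max a := by
  induction l generalizing a with
  | nil => simp
  | cons x l ih => exact le_trans (le_max_left a x) (ih _)

lemma mem_le_foldl_max (l : List Int) (a x : Int) (h : x ∈ l) : x ≤ l.foldl max a := by
  induction l generalizing a with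
  | nil => simp at h
  | cons y l ih =>
    rcases List.mem_cons.mp h with h | h
    · subst h; exact le_trans (le_max_right a x) (le_foldl_max _ _)
    · exact ih _ h

lemma foldl_max_cases (l : List Int) (a : Int) : l.foldl max a = a ∨ l.foldl max a ∈ l := by
  induction l generalizing a with
  | nil => simp
  | cons x l ih =>
    rcases ih (max a x) with h | h
    · rcases max_cases a x with ⟨h2, _⟩ | ⟨h2, _⟩
      · left; rw [List.foldl_cons, h, h2]
      · right; rw [List.foldl_cons, h]; rw [h2]; exact List.mem_cons_self
    · right; simp [List.foldl_cons]; right; exact h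

lemma exists_max (l : List Int) (h : l ≠ []) : ∃ m ∈ l, ∀ x ∈ l, x ≤ m := by
  induction l with
  | nil => simp at h
  | cons x l ih =>
    rcases eq_or_ne l [] with rfl | hne
    · exact ⟨x, by simp⟩
    · obtain ⟨m, hm, hmax⟩ := ih hne
      rcases le_total x m with hx | hx
      · refine ⟨m, by simp [hm], ?_⟩
        intro y hy
        rcases List.mem_cons.mp hy with rfl | hy
        · exact hx
        · exact hmax y hy
      · refine ⟨x, by simp, ?_⟩
        intro y hy
        rcases List.mem_cons.mp hy with rfl | hy
        · exact le_refl y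
        · exact le_trans (hmax y hy) hx

lemma cnt_mono (L : List Int) (s t : Int) (h : s ≤ t) : cnt L s ≤ cnt L t := by
  induction L with
  | nil => simp [cnt]
  | cons x L ih =>
    simp only [cnt, List.filter_cons] at *
    split_ifs with h1 h2 h2 <;> simp_all <;> omega

lemma solve_alt_eq (A B : List Int) : solve_alt A B = (A.map (g A B)).foldl max 0 := by
  show (A.map (fun t => ((bs (PySem.List.sorted A (fun x => x) false) t 0
      (PySem.List.sorted A (fun x => x) false).length : Nat) : Int)
      - ((bs (PySem.List.sorted B (fun x => x) false) t 0
      (PySem.List.sorted B (fun x => x) false).length : Nat) : Int))).foldl max 0 = _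
  congr 1
  apply List.map_congr_left
  intro t _
  rw [bs_sorted_eq_cnt, bs_sorted_eq_cnt]
  rfl

-- crux: the occupancy at ANY time is bounded by B's max over arrival times (floored at 0)
lemma g_le_alt (A B : List Int) (t : Int) : g A B t ≤ solve_alt A B := by
  rw [solve_alt_eq]
  by_cases h : A.filter (fun x => decide (x ≤ t)) = []
  · have hA : cnt A t = 0 := by simp [cnt, h]
    have hB : 0 ≤ cnt B t := by unfold cnt; positivity
    have : g A B t ≤ 0 := by unfold g; omega
    exact le_trans this (le_foldl_max _ _)
  · obtain ⟨m, hm, hmax⟩ := exists_max _ h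
    have hmA : m ∈ A := (List.mem_filter.mp hm).1
    have hmt : m ≤ t := by simpa using (List.mem_filter.mp hm).2
    have hAcnt : cnt A t = cnt A m := by
      unfold cnt
      congr 2
      apply List.filter_congr
      intro a ha
      by_cases hat : a ≤ t
      · have : a ∈ A.filter (fun x => decide (x ≤ t)) := List.mem_filter.mpr ⟨ha, by simpa⟩
        simp [hat, hmax a this]
      · have : ¬ a ≤ m := fun hc => hat (le_trans hc hmt)
        simp [hat, this]
    have hBcnt : cnt B m ≤ cnt B t := cnt_mono B m t hmt
    have h1 : g A B t ≤ g A B m := by unfold g; omega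
    have h2 : g A B m ≤ (A.map (g A B)).foldl max 0 :=
      mem_le_foldl_max _ _ _ (List.mem_map.mpr ⟨m, hmA, rfl⟩)
    omega

-- characterisation of A's port: a fold of max over the occupancies at the sorted distinct times
lemma solve_eq_foldl (A B : List Int) :
    ∃ l : List Int, (∀ a, (a ∈ A ∨ a ∈ B) → a ∈ l) ∧ (∀ a ∈ l, a ∈ A ∨ a ∈ B) ∧
      solve A B = (l.map (g A B)).foldl max 0 := by
  unfold solve
  set n1 := A.foldl (fun d a => d.insert a (d.getD a 0 + 1)) (PySem.Dict.empty : PySem.Dict Int Int) with hn1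
  set n2 := B.foldl (fun d b => d.insert b (d.getD b 0 - 1)) n1 with hn2
  have hgetD : ∀ v, n2.getD v 0 = dlt A B v := by
    intro v
    rw [hn2, getD_foldl_insert_sub_one, hn1, PySem.Dict.getD_foldl_insert_add_one]
    simp [dlt]
  have hkeys1 : n1.keys = PySem.Set.update (PySem.Dict.empty : PySem.Dict Int Int).keys A :=
    PySem.Dict.keys_foldl_insert ..
  have hkeys2 : n2.keys = PySem.Set.update n1.keys B := PySem.Dict.keys_foldl_insert ..
  have hmemk : ∀ a, a ∈ n2.keys ↔ (a ∈ A ∨ a ∈ B) := by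
    intro a
    rw [hkeys2, PySem.Set.mem_update, hkeys1, PySem.Set.mem_update]
    simp [PySem.Dict.keys_empty]
  have hndk : n2.keys.Nodup := by
    rw [hkeys2, hkeys1]
    exact PySem.Set.nodup_update _ _ (PySem.Set.nodup_update _ _ (by simp [PySem.Dict.keys_empty]))
  set l := PySem.List.sorted n2.keys (fun x => x) false with hl
  have hmeml : ∀ a, a ∈ l ↔ a ∈ n2.keys := fun a => PySem.List.mem_sorted _ _ _ _
  have hndl : l.Nodup := (PySem.List.sorted_perm n2.keys (fun x => x) false).nodup_iff.mpr hndk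
  have hple : l.Pairwise (fun a b => a ≤ b) := PySem.List.sorted_pairwise _ _
  have hplt : l.Pairwise (· < ·) := by
    have := hple.and hndl
    exact this.imp (fun h => lt_of_le_of_ne h.1 h.2)
  refine ⟨l, ?_, ?_, ?_⟩
  · intro a ha; exact (hmeml a).mpr ((hmemk a).mpr ha)
  · intro a ha; exact (hmemk a).mp ((hmeml a).mp ha)
  · show (l.foldl (fun (p : Int × Int) t =>
        (p.1 + n2.getD t 0, max p.2 (p.1 + n2.getD t 0))) (0, 0)).2 = (l.map (g A B)).foldl max 0
    rw [foldl_pair_eq_rs]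
    rw [show (fun t => n2.getD t 0) = dlt A B from funext hgetD]
    have h2 : rs (dlt A B) 0 l = l.map (g A B) := by
      simpa using rs_eq_map_g A B l []
        (by simpa using hplt)
        (by intro a ha; simpa using (hmeml a).mpr ((hmemk a).mpr ha))
    rw [h2]
-- ===== VERDICT (by name: the statement is the Claim_ definition above) =====
theorem solve_spec : Claim_equal_solve := by
  intro A B _
  unfold Spec_solve
  obtain ⟨l, hcomp, hsub, hsolve⟩ := solve_eq_foldl A B
  rw [hsolve]
  apply le_antisymm
  · rcases foldl_max_cases (l.map (g A B)) 0 with h | h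
    · rw [h, solve_alt_eq]; exact le_foldl_max _ _
    · obtain ⟨t, _, hgt⟩ := List.mem_map.mp h
      rw [← hgt]; exact g_le_alt A B t
  · rw [solve_alt_eq]
    rcases foldl_max_cases (A.map (g A B)) 0 with h | h
    · rw [h]; exact le_foldl_max _ _
    · obtain ⟨a, haA, hga⟩ := List.mem_map.mp h
      rw [← hga]
      exact mem_le_foldl_max _ _ _ (List.mem_map.mpr ⟨a, hcomp a (Or.inl haA), rfl⟩)
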